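-- pv_equiv track=rewrite | github.com/holagony/qh_xj | Module03/wrapped/cold_wave_stats.py | generate_group_num
-- ===== SOURCE A (Python) =====
-- def generate_group_num(values, diff=1):
--     group_ids = []
--     group_id = 0
--     last_v = 0
--
--     for value in values:
--         if value - last_v > diff:
--             group_id += 1
--
--         group_ids.append(group_id)
--         last_v = value
--
--     return group_ids
-- ===== SOURCE B (Python) =====
-- def generate_group_num(values, diff=1):
--     # pass 1: mark group boundaries (predecessor of the first element is 0)
--     marks = [1 if v - p > diff else 0 for p, v in zip([0] + values[:-1], values)]
--     # pass 2: prefix sum of the boundary indicators gives the group ids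
--     out = []
--     total = 0
--     for m in marks:
--         total += m
--         out.append(total)
--     return out
-- ===== Notes on version B (the rewrite author's own statement) =====
-- stated objective: alternative
-- what changed: Replaces the fused stateful loop (tracking group_id and last_v together) by a detect-then-accumulate decomposition: a zip-with-predecessor pass builds a 0/1 boundary-indicator list, then a prefix sum over the indicators yields the group ids.
import Mathlib
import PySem

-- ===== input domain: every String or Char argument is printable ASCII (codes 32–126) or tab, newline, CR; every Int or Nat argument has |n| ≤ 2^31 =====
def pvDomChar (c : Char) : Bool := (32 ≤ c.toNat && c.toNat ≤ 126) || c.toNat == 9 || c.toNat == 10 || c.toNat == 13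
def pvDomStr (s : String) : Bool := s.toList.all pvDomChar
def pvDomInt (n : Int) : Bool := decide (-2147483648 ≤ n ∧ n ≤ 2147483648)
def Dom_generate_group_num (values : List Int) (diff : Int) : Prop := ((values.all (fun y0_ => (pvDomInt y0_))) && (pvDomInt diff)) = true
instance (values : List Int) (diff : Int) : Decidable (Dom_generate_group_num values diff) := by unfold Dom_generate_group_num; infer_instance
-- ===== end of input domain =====

-- B replaces A's fused stateful loop by a detect-boundaries pass (zip with predecessor)
-- followed by a prefix-sum pass; alternative decomposition, same O(n) cost.


-- ===== PORT A =====
-- fold state: (group_ids, group_id, last_v)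
def generate_group_num (values : List Int) (diff : Int) : List Int :=
  (values.foldl
    (fun (st : List Int × Int × Int) value =>
      let group_id := if value - st.2.2 > diff then st.2.1 + 1 else st.2.1
      (st.1 ++ [group_id], group_id, value))
    ([], 0, 0)).1

-- ===== PORT B =====
-- pass 1: zip values with their predecessors ([0] + values[:-1]) and mark boundaries
-- pass 2: prefix sum of the marks (state: (out, total))
def generate_group_num_alt (values : List Int) (diff : Int) : List Int :=
  let marks := (List.zip (0 :: values.dropLast) values).map
    (fun pv => if pv.2 - pv.1 > diff then (1 : Int) else 0)
  (marks.foldl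
    (fun (st : List Int × Int) m => (st.1 ++ [st.2 + m], st.2 + m))
    ([], 0)).1

-- ===== PRECONDITION & SPEC =====
def Spec_generate_group_num (values : List Int) (diff : Int) (out : List Int) : Prop := out = generate_group_num_alt values diff
instance (values : List Int) (diff : Int) (out : List Int) : Decidable (Spec_generate_group_num values diff out) := by unfold Spec_generate_group_num; infer_instance

-- ===== CLAIM (what is proved, stated in full; the proofs are below) =====
def Claim_equal_generate_group_num : Prop := ∀ (values : List Int) (diff : Int), Dom_generate_group_num values diff → Spec_generate_group_num values diff (generate_group_num values diff)

-- ===== LEMMAS AND PROOFS =====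

-- reference recursion: ids of vs given current group id and previous value
def ggn (diff : Int) : List Int → Int → Int → List Int
  | [], _, _ => []
  | v :: vs, gid, last =>
    let gid' := if v - last > diff then gid + 1 else gid
    gid' :: ggn diff vs gid' v

-- predecessor pairing: pairs p [x1,x2,…] = [(p,x1),(x1,x2),…]
def pairsWith (p : Int) : List Int → List (Int × Int)
  | [] => []
  | x :: xs => (p, x) :: pairsWith x xs

theorem zip_dropLast_eq_pairsWith (p : Int) (xs : List Int) :
    List.zip (p :: xs.dropLast) xs = pairsWith p xs := by
  induction xs generalizing p with
  | nil => rfl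
  | cons x xs ih =>
    cases xs with
    | nil => rfl
    | cons y ys =>
      simp only [List.dropLast_cons₂, List.zip_cons_cons, pairsWith]
      exact congrArg _ (ih x)

theorem foldA_eq (diff : Int) (vs : List Int) (acc : List Int) (gid last : Int) :
    (vs.foldl
      (fun (st : List Int × Int × Int) value =>
        let group_id := if value - st.2.2 > diff then st.2.1 + 1 else st.2.1
        (st.1 ++ [group_id], group_id, value))
      (acc, gid, last)).1 = acc ++ ggn diff vs gid last := by
  induction vs generalizing acc gid last with
  | nil => simp [ggn]
  | cons v vs ih =>
    simp only [List.foldl_cons, ggn]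
    rw [ih]
    simp

theorem foldB_eq (diff : Int) (vs : List Int) (p : Int) (acc : List Int) (s : Int) :
    (((pairsWith p vs).map
        (fun pv => if pv.2 - pv.1 > diff then (1 : Int) else 0)).foldl
      (fun (st : List Int × Int) m => (st.1 ++ [st.2 + m], st.2 + m))
      (acc, s)).1 = acc ++ ggn diff vs s p := by
  induction vs generalizing p acc s with
  | nil => simp [pairsWith, ggn]
  | cons v vs ih =>
    simp only [pairsWith, List.map_cons, List.foldl_cons, ggn]
    rw [ih]
    by_cases h : v - p > diff <;> simp [h]

-- ===== VERDICT (by name: the statement is the Claim_ definition above) =====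
theorem generate_group_num_spec : Claim_equal_generate_group_num := by
  intro values diff _
  unfold Spec_generate_group_num generate_group_num generate_group_num_alt
  rw [foldA_eq, zip_dropLast_eq_pairsWith, foldB_eq]
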